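-- pv_equiv track=rewrite | github.com/BlessedLongsword/Advent-of-Code | advent_of_code/year2024/day06.py | is_part_of_cycle
-- ===== SOURCE A (Python) =====
-- def is_part_of_cycle(area_map, position, steps):
--     first_cycle = list()
--     second_cycle = list()
--     in_first_cycle = True
--     for step in steps[::-1]:
--         if in_first_cycle:
--             first_cycle.append(step)
--             if step == position:
--                 in_first_cycle = False
--         else:
--             second_cycle.append(step)
--             if step == position:
--                 return first_cycle == second_cycle
--     return False
-- ===== SOURCE B (Python) =====
-- def is_part_of_cycle(area_map, position, steps):
--     r = steps[::-1]
--     try: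
--         i = r.index(position)
--         tail = r[i + 1:]
--         j = tail.index(position)
--     except ValueError:
--         return False
--     return r[:i + 1] == tail[:j + 1]
-- ===== Notes on version B (the rewrite author's own statement) =====
-- stated objective: simpler
-- what changed: Replaces A's state-machine loop with two accumulator lists by locating the first two occurrences of position in the reversed steps with list.index and comparing the two slices directly.
import Mathlib
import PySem

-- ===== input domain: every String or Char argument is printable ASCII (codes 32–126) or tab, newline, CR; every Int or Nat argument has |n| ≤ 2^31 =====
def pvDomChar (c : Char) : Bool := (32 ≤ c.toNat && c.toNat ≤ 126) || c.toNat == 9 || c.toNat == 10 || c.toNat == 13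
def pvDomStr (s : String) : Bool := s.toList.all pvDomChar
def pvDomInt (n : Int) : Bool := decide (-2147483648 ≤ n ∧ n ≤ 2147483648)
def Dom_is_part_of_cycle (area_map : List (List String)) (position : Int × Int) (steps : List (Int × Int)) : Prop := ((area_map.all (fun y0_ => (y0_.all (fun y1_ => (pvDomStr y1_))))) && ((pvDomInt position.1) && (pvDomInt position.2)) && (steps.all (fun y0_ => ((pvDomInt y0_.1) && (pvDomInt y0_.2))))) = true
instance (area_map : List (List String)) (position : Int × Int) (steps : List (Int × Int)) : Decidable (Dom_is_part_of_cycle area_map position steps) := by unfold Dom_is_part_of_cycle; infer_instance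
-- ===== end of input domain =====

-- B replaces A's two-accumulator state machine with index-based occurrence finding plus slice comparison (objective: simpler).

-- ===== PORT A =====
-- A's loop over steps[::-1]; state: first_cycle, second_cycle, in_first_cycle.
def pvLoopA (position : Int × Int) :
    List (Int × Int) → List (Int × Int) → List (Int × Int) → Bool → Bool
  | [], _, _, _ => false
  | step :: rest, fc, sc, inFirst =>
    if inFirst then
      let fc' := fc ++ [step]
      if step == position then pvLoopA position rest fc' sc false
      else pvLoopA position rest fc' sc true
    else
      let sc' := sc ++ [step]
      if step == position then fc == sc'
      else pvLoopA position rest fc sc' false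

def is_part_of_cycle (area_map : List (List String)) (position : Int × Int) (steps : List (Int × Int)) : Bool :=
  pvLoopA position ((PySem.List.slice? steps none none (-1)).getD []) [] [] true

-- ===== PORT B =====
def is_part_of_cycle_alt (area_map : List (List String)) (position : Int × Int) (steps : List (Int × Int)) : Bool :=
  let r := (PySem.List.slice? steps none none (-1)).getD []      -- r = steps[::-1]
  match PySem.List.index? r position with
  | none => false                                                -- ValueError → False
  | some i =>
    let tail := PySem.List.slice r (some ((i : Int) + 1)) none   -- r[i+1:]
    match PySem.List.index? tail position with
    | none => false                                              -- ValueError → False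
    | some j =>
      PySem.List.slice r none (some ((i : Int) + 1)) ==          -- r[:i+1]
        PySem.List.slice tail none (some ((j : Int) + 1))        -- tail[:j+1]

-- ===== PRECONDITION & SPEC =====
def Spec_is_part_of_cycle (area_map : List (List String)) (position : Int × Int) (steps : List (Int × Int)) (out : Bool) : Prop := out = is_part_of_cycle_alt area_map position steps
instance (area_map : List (List String)) (position : Int × Int) (steps : List (Int × Int)) (out : Bool) : Decidable (Spec_is_part_of_cycle area_map position steps out) := by unfold Spec_is_part_of_cycle; infer_instance

-- ===== CLAIM (what is proved, stated in full; the proofs are below) =====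
def Claim_equal_is_part_of_cycle : Prop := ∀ (area_map : List (List String)) (position : Int × Int) (steps : List (Int × Int)), Dom_is_part_of_cycle area_map position steps → Spec_is_part_of_cycle area_map position steps (is_part_of_cycle area_map position steps)

-- ===== LEMMAS AND PROOFS =====

-- Phase 2 of A's loop: second_cycle accumulates until the next occurrence of position.
theorem pvLoopA_false (position : Int × Int) (r fc sc : List (Int × Int)) :
    pvLoopA position r fc sc false =
      (match PySem.List.index? r position with
       | none => false
       | some j => fc == sc ++ r.take (j + 1)) := by
  induction r generalizing sc with
  | nil => simp [pvLoopA, PySem.List.index?]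
  | cons x rest ih =>
    by_cases hx : x = position
    · subst hx
      rw [PySem.List.index?_cons_self]
      simp [pvLoopA, List.take_succ_cons]
    · rw [PySem.List.index?_cons_of_ne _ hx]
      simp only [pvLoopA, beq_iff_eq, if_neg hx]
      rw [ih]
      cases PySem.List.index? rest position with
      | none => rfl
      | some j => dsimp only [Option.map_some]; simp [List.take_succ_cons, List.append_assoc]

-- Phase 1 of A's loop: first_cycle accumulates until the first occurrence of position.
theorem pvLoopA_true (position : Int × Int) (r fc : List (Int × Int)) :
    pvLoopA position r fc [] true =
      (match PySem.List.index? r position with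
       | none => false
       | some i =>
         match PySem.List.index? (r.drop (i + 1)) position with
         | none => false
         | some j => (fc ++ r.take (i + 1)) == (r.drop (i + 1)).take (j + 1)) := by
  induction r generalizing fc with
  | nil => simp [pvLoopA, PySem.List.index?]
  | cons x rest ih =>
    by_cases hx : x = position
    · subst hx
      rw [PySem.List.index?_cons_self]
      simp only [pvLoopA, beq_self_eq_true, if_true]
      rw [pvLoopA_false]
      simp [List.take_succ_cons]
    · rw [PySem.List.index?_cons_of_ne _ hx]
      simp only [pvLoopA, beq_iff_eq, if_neg hx]
      rw [ih]
      cases PySem.List.index? rest position with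
      | none => rfl
      | some i => dsimp only [Option.map_some]; simp [List.take_succ_cons, List.append_assoc, List.drop_succ_cons]

-- B's slices, rewritten to take/drop.
theorem alt_eq (area_map : List (List String)) (position : Int × Int) (steps : List (Int × Int)) :
    is_part_of_cycle_alt area_map position steps =
      (match PySem.List.index? steps.reverse position with
       | none => false
       | some i =>
         match PySem.List.index? (steps.reverse.drop (i + 1)) position with
         | none => false
         | some j => (steps.reverse.take (i + 1)) == (steps.reverse.drop (i + 1)).take (j + 1)) := by
  unfold is_part_of_cycle_alt
  rw [PySem.List.slice?_none_none_neg_one]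
  simp only [Option.getD_some]
  cases PySem.List.index? steps.reverse position with
  | none => rfl
  | some i =>
    have h1 : ((i : Int) + 1) = ((i + 1 : Nat) : Int) := by push_cast; ring
    dsimp only
    rw [h1, PySem.List.slice_from_natCast, PySem.List.slice_to_natCast]
    cases PySem.List.index? (steps.reverse.drop (i + 1)) position with
    | none => rfl
    | some j =>
      have h2 : ((j : Int) + 1) = ((j + 1 : Nat) : Int) := by push_cast; ring
      dsimp only
      rw [h2, PySem.List.slice_to_natCast]

-- ===== VERDICT (by name: the statement is the Claim_ definition above) =====
theorem is_part_of_cycle_spec : Claim_equal_is_part_of_cycle := by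
  intro area_map position steps _
  unfold Spec_is_part_of_cycle
  rw [alt_eq]
  unfold is_part_of_cycle
  rw [PySem.List.slice?_none_none_neg_one]
  simp only [Option.getD_some]
  rw [pvLoopA_true]
  cases PySem.List.index? steps.reverse position with
  | none => rfl
  | some i =>
    cases PySem.List.index? (steps.reverse.drop (i + 1)) position with
    | none => rfl
    | some j => simp
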